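-- pv_equiv track=rewrite | github.com/UberMayinch/Algorithmic-Programming | cf/964/F5.py | count_valid_subsequences
-- ===== SOURCE A (Python) =====
-- MOD = 10**9 + 7
--
-- def mod_inv(x, mod):
--     return pow(x, mod - 2, mod)
--
-- def precompute_factorials_and_inverses(max_n, mod):
--     fact = [1] * (max_n + 1)
--     inv_fact = [1] * (max_n + 1)
--
--     for i in range(2, max_n + 1):
--         fact[i] = fact[i - 1] * i % mod
--
--     inv_fact[max_n] = mod_inv(fact[max_n], mod)
--     for i in range(max_n - 1, 0, -1):
--         inv_fact[i] = inv_fact[i + 1] * (i + 1) % mod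
--
--     return fact, inv_fact
--
-- def count_valid_subsequences(binary_sequence, k):
--     n = len(binary_sequence)
--     count_ones = binary_sequence.count(1)
--
--     min_ones = (k + 1) // 2
--
--     fact, inv_fact = precompute_factorials_and_inverses(k, MOD)
--
--     dp = [0] * (count_ones + 1)
--     dp[0] = 1
--
--     for bit in binary_sequence:
--         if bit == 1:
--             for j in range(count_ones, 0, -1):
--                 dp[j] = (dp[j] + dp[j - 1]) % MOD
--         else:
--             new_dp = dp[:]
--             for i in range(1, k + 1):
--                 for j in range(count_ones + 1):
--                     new_dp[j] = (new_dp[j] + dp[j]) % MOD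
--             dp = new_dp
--
--     result = sum(dp[j] for j in range(min_ones, count_ones + 1)) % MOD
--
--     return result
-- ===== SOURCE B (Python) =====
-- MOD = 10**9 + 7
--
-- def count_valid_subsequences(binary_sequence, k):
--     # DP over ones only: a zero bit multiplies every dp entry by (k+1) mod MOD
--     # instead of A's k rounds of elementwise additions; a one bit is a Pascal shift.
--     ones = binary_sequence.count(1)
--     dp = [1] + [0] * ones
--     mult = (k + 1) % MOD
--     for bit in binary_sequence:
--         if bit == 1:
--             dp = [(a + b) % MOD for a, b in zip(dp, [0] + dp)]
--         else:
--             dp = [x * mult % MOD for x in dp]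
--     return sum(dp[(k + 1) // 2:]) % MOD
-- ===== Notes on version B (the rewrite author's own statement) =====
-- stated objective: faster
-- what changed: On a zero bit B multiplies every dp entry once by (k+1) mod MOD instead of A's k rounds of elementwise additions, and replaces A's in-place index loops (and the unused factorial precomputation) by whole-list zip/map passes.
import Mathlib
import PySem

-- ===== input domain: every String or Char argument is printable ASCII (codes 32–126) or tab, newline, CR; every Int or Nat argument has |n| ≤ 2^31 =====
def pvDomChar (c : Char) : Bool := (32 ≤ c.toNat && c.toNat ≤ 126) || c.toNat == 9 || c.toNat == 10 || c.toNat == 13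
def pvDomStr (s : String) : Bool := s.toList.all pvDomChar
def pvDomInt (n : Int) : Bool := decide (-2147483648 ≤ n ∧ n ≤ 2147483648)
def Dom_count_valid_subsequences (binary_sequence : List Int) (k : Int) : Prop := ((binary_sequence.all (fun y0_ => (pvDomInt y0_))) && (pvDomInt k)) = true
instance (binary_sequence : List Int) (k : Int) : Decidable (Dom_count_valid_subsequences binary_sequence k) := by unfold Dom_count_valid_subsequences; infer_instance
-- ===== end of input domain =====

-- B replaces A's k-round elementwise accumulation on a zero bit by one multiply of each dp entry
-- by (k+1) mod MOD, and A's in-place index loops by whole-list zip/map passes (objective: faster).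

def pyMOD : Int := 1000000007

-- ===== PORT A =====
-- pow(x, mod - 2, mod); the exponent is nonnegative at the only call site (mod = pyMOD), where .toNat is exact
def mod_inv (x : Int) (mod : Int) : Int := PySem.Int.powMod x (mod - 2).toNat mod

-- list indexing here is total (pyGetD/pySetD): Python raises IndexError exactly when max_n < 0, excluded by Pre_
def precompute_factorials_and_inverses (max_n : Int) (mod : Int) : List Int × List Int :=
  let fact := PySem.List.pyRepeat [(1 : Int)] (max_n + 1)
  let inv_fact := PySem.List.pyRepeat [(1 : Int)] (max_n + 1)
  let fact := (PySem.List.pyRange 2 (max_n + 1) 1).foldl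
    (fun f i => PySem.List.pySetD f i (PySem.Int.mod (PySem.List.pyGetD f (i - 1) 0 * i) mod)) fact
  let inv_fact := PySem.List.pySetD inv_fact max_n (mod_inv (PySem.List.pyGetD fact max_n 0) mod)
  let inv_fact := (PySem.List.pyRange (max_n - 1) 0 (-1)).foldl
    (fun g i => PySem.List.pySetD g i (PySem.Int.mod (PySem.List.pyGetD g (i + 1) 0 * (i + 1)) mod)) inv_fact
  (fact, inv_fact)

-- A's inner loop 'for j in range(count_ones, 0, -1): dp[j] = (dp[j] + dp[j-1]) % MOD', named
def pascalLoop (dp : List Int) (j : Int) : List Int :=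
  (PySem.List.pyRange j 0 (-1)).foldl
    (fun d j => PySem.List.pySetD d j
      (PySem.Int.mod (PySem.List.pyGetD d j 0 + PySem.List.pyGetD d (j - 1) 0) pyMOD)) dp

-- A's inner loop 'for j in range(count_ones + 1): new_dp[j] = (new_dp[j] + dp[j]) % MOD', named (N = count_ones + 1)
def addLoop (dp nd : List Int) (N : Int) : List Int :=
  (PySem.List.pyRange 0 N 1).foldl
    (fun nd j => PySem.List.pySetD nd j
      (PySem.Int.mod (PySem.List.pyGetD nd j 0 + PySem.List.pyGetD dp j 0) pyMOD)) nd

-- A's zero-bit branch: 'new_dp = dp[:]; for i in range(1, k + 1): <addLoop>', named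
def repLoop (dp : List Int) (k c : Int) : List Int :=
  (PySem.List.pyRange 1 (k + 1) 1).foldl (fun nd _i => addLoop dp nd (c + 1))
    (PySem.List.slice dp none none)

def count_valid_subsequences (binary_sequence : List Int) (k : Int) : Int :=
  let _n : Int := binary_sequence.length
  let count_ones : Int := (PySem.List.count binary_sequence 1 : Nat)
  let min_ones : Int := PySem.Int.floordiv (k + 1) 2
  let _fi := precompute_factorials_and_inverses k pyMOD
  let dp : List Int := PySem.List.pySetD (PySem.List.pyRepeat [(0 : Int)] (count_ones + 1)) 0 1
  let dp := binary_sequence.foldl (fun dp bit =>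
    if bit == 1 then pascalLoop dp count_ones else repLoop dp k count_ones) dp
  PySem.Int.mod ((PySem.List.pyRange min_ones (count_ones + 1) 1).map
    (fun j => PySem.List.pyGetD dp j 0)).sum pyMOD

-- ===== PORT B =====
def count_valid_subsequences_alt (binary_sequence : List Int) (k : Int) : Int :=
  let ones : Int := (PySem.List.count binary_sequence 1 : Nat)
  let dp0 : List Int := 1 :: PySem.List.pyRepeat [(0 : Int)] ones
  let mult : Int := PySem.Int.mod (k + 1) pyMOD
  let dp := binary_sequence.foldl (fun dp bit =>
    if bit == 1 then
      (dp.zip (0 :: dp)).map (fun p => PySem.Int.mod (p.1 + p.2) pyMOD)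
    else
      dp.map (fun x => PySem.Int.mod (x * mult) pyMOD)) dp0
  PySem.Int.mod (PySem.List.slice dp (some (PySem.Int.floordiv (k + 1) 2)) none).sum pyMOD

-- ===== PRECONDITION & SPEC =====
-- Python A raises IndexError (inside precompute_factorials_and_inverses) exactly when k < 0
def Pre_count_valid_subsequences (binary_sequence : List Int) (k : Int) : Prop := 0 ≤ k
instance (binary_sequence : List Int) (k : Int) : Decidable (Pre_count_valid_subsequences binary_sequence k) := by unfold Pre_count_valid_subsequences; infer_instance
def pvWitness_count_valid_subsequences : List Int × Int := ([1, 0, 1], 2)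

def Spec_count_valid_subsequences (binary_sequence : List Int) (k : Int) (out : Int) : Prop := out = count_valid_subsequences_alt binary_sequence k
instance (binary_sequence : List Int) (k : Int) (out : Int) : Decidable (Spec_count_valid_subsequences binary_sequence k out) := by unfold Spec_count_valid_subsequences; infer_instance

-- ===== CLAIM (what is proved, stated in full; the proofs are below) =====
def Claim_equal_count_valid_subsequences : Prop := ∀ (binary_sequence : List Int) (k : Int), Dom_count_valid_subsequences binary_sequence k → Pre_count_valid_subsequences binary_sequence k → Spec_count_valid_subsequences binary_sequence k (count_valid_subsequences binary_sequence k)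

-- ===== LEMMAS AND PROOFS =====

def pvInv (dp : List Int) : Prop := ∀ x ∈ dp, 0 ≤ x ∧ x < pyMOD

lemma getD_set' (l : List Int) (n i : Nat) (v : Int) :
    (l.set n v).getD i 0 = if n = i ∧ n < l.length then v else l.getD i 0 := by
  simp only [List.getD_eq_getElem?_getD, List.getElem?_set]
  by_cases h : n = i
  · subst h
    by_cases h2 : n < l.length
    · simp [h2]
    · simp [h2]
  · simp [h]

lemma ext_getD (l1 l2 : List Int) (hl : l1.length = l2.length)
    (h : ∀ i, i < l1.length → l1.getD i 0 = l2.getD i 0) : l1 = l2 := by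
  apply List.ext_getElem hl
  intro i h1 h2
  have := h i h1
  rwa [List.getD_eq_getElem l1 0 h1, List.getD_eq_getElem l2 0 h2] at this

lemma pascalLoop_zero (dp : List Int) : pascalLoop dp 0 = dp := by
  unfold pascalLoop
  rw [PySem.List.pyRange_neg_one_eq_nil (by omega)]
  rfl

lemma pascalLoop_succ (j : Nat) (dp : List Int) :
    pascalLoop dp ((j + 1 : Nat) : Int) =
      pascalLoop (dp.set (j + 1) (PySem.Int.mod (dp.getD (j + 1) 0 + dp.getD j 0) pyMOD)) (j : Int) := by
  unfold pascalLoop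
  rw [PySem.List.pyRange_neg_one_cons (by exact_mod_cast Nat.succ_pos j)]
  rw [List.foldl_cons]
  rw [show ((j + 1 : Nat) : Int) - 1 = (j : Int) by push_cast; ring]
  rw [PySem.List.pySetD_natCast, PySem.List.pyGetD_natCast, PySem.List.pyGetD_natCast]

lemma pascalLoop_length (j : Nat) (dp : List Int) : (pascalLoop dp (j : Int)).length = dp.length := by
  induction j generalizing dp with
  | zero => rw [show ((0:Nat):Int) = 0 by norm_num, pascalLoop_zero]
  | succ n ih => rw [pascalLoop_succ, ih]; simp

lemma pascalLoop_getD (j : Nat) (dp : List Int) (i : Nat) :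
    (pascalLoop dp (j : Int)).getD i 0 =
      if 1 ≤ i ∧ i ≤ j ∧ i < dp.length then
        PySem.Int.mod (dp.getD i 0 + dp.getD (i - 1) 0) pyMOD
      else dp.getD i 0 := by
  induction j generalizing dp with
  | zero =>
    rw [show ((0:Nat):Int) = 0 by norm_num, pascalLoop_zero]
    simp
    intros
    omega
  | succ n ih =>
    rw [pascalLoop_succ, ih]
    simp only [getD_set', List.length_set]
    by_cases hd : n + 1 = i ∧ n + 1 < dp.length
    · obtain ⟨e, f⟩ := hd
      subst e
      simp only [Nat.add_sub_cancel]
      rw [if_neg (by omega : ¬ (1 ≤ n + 1 ∧ n + 1 ≤ n ∧ n + 1 < dp.length))]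
      simp [f]
    · by_cases hc : 1 ≤ i ∧ i ≤ n ∧ i < dp.length
      · rw [if_pos hc,
          if_neg (by omega : ¬ (n + 1 = i ∧ n + 1 < dp.length)),
          if_neg (by omega : ¬ (n + 1 = i - 1 ∧ n + 1 < dp.length)),
          if_pos (by omega : 1 ≤ i ∧ i ≤ n + 1 ∧ i < dp.length)]
      · rw [if_neg hc, if_neg hd,
          if_neg (by omega : ¬ (1 ≤ i ∧ i ≤ n + 1 ∧ i < dp.length))]

lemma addLoop_zero (dp nd : List Int) : addLoop dp nd 0 = nd := by
  unfold addLoop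
  rw [PySem.List.pyRange_one_eq_nil (by omega)]
  rfl

lemma addLoop_succ (dp nd : List Int) (N : Nat) :
    addLoop dp nd ((N + 1 : Nat) : Int) =
      (addLoop dp nd (N : Int)).set N
        (PySem.Int.mod ((addLoop dp nd (N : Int)).getD N 0 + dp.getD N 0) pyMOD) := by
  unfold addLoop
  rw [show ((N + 1 : Nat) : Int) = (N : Int) + 1 by push_cast; ring]
  rw [PySem.List.pyRange_one_succ_right (by omega : (0:Int) ≤ (N : Int))]
  rw [List.foldl_append, List.foldl_cons, List.foldl_nil]
  rw [PySem.List.pySetD_natCast, PySem.List.pyGetD_natCast, PySem.List.pyGetD_natCast]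

lemma addLoop_length (dp nd : List Int) (N : Nat) : (addLoop dp nd (N : Int)).length = nd.length := by
  induction N with
  | zero => rw [show ((0:Nat):Int) = 0 by norm_num, addLoop_zero]
  | succ n ih => rw [addLoop_succ, List.length_set, ih]

lemma addLoop_getD (dp nd : List Int) (N : Nat) (i : Nat) :
    (addLoop dp nd (N : Int)).getD i 0 =
      if i < N ∧ i < nd.length then
        PySem.Int.mod (nd.getD i 0 + dp.getD i 0) pyMOD
      else nd.getD i 0 := by
  induction N generalizing i with
  | zero =>
    rw [show ((0:Nat):Int) = 0 by norm_num, addLoop_zero]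
    simp
  | succ n ih =>
    rw [addLoop_succ, getD_set', addLoop_length, ih i, ih n]
    by_cases hd : n = i ∧ n < nd.length
    · obtain ⟨e, f⟩ := hd
      subst e
      rw [if_pos ⟨rfl, f⟩, if_neg (by omega : ¬ (n < n ∧ n < nd.length)),
        if_pos (by omega : n < n + 1 ∧ n < nd.length)]
    · rw [if_neg hd]
      by_cases hc : i < n ∧ i < nd.length
      · rw [if_pos hc, if_pos (by omega : i < n + 1 ∧ i < nd.length)]
      · rw [if_neg hc, if_neg (by omega : ¬ (i < n + 1 ∧ i < nd.length))]

lemma repLoop_zero (dp : List Int) (c : Int) : repLoop dp 0 c = dp := by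
  unfold repLoop
  rw [PySem.List.pyRange_one_eq_nil (by omega), List.foldl_nil, PySem.List.slice_none_none]

lemma repLoop_succ (dp : List Int) (T : Nat) (c : Int) :
    repLoop dp ((T + 1 : Nat) : Int) c = addLoop dp (repLoop dp (T : Int) c) (c + 1) := by
  unfold repLoop
  rw [show ((T + 1 : Nat) : Int) + 1 = ((T : Int) + 1) + 1 by push_cast; ring]
  rw [PySem.List.pyRange_one_succ_right (by omega : (1:Int) ≤ (T : Int) + 1)]
  rw [List.foldl_append, List.foldl_cons, List.foldl_nil]

lemma repLoop_length (dp : List Int) (T : Nat) (c : Nat) :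
    (repLoop dp (T : Int) ((c : Int))).length = dp.length := by
  induction T with
  | zero => rw [show ((0:Nat):Int) = 0 by norm_num, repLoop_zero]
  | succ n ih =>
    rw [repLoop_succ, show ((c : Int) + 1) = ((c + 1 : Nat) : Int) by push_cast; ring,
      addLoop_length, ih]

lemma repLoop_getD (dp : List Int) (c : Nat) (hlen : dp.length = c + 1) (hinv : pvInv dp)
    (T : Nat) (i : Nat) (hi : i < dp.length) :
    (repLoop dp (T : Int) (c : Int)).getD i 0 = (dp.getD i 0 * ((T : Int) + 1)) % pyMOD := by
  have hmem : dp.getD i 0 ∈ dp := by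
    rw [List.getD_eq_getElem dp 0 hi]
    exact List.getElem_mem hi
  obtain ⟨h0, h1⟩ := hinv _ hmem
  induction T with
  | zero =>
    rw [show ((0:Nat):Int) = 0 by norm_num, repLoop_zero]
    norm_num
    exact (Int.emod_eq_of_lt h0 h1).symm
  | succ n ih =>
    rw [repLoop_succ, show ((c : Int) + 1) = ((c + 1 : Nat) : Int) by push_cast; ring,
      addLoop_getD, repLoop_length]
    rw [if_pos ⟨by omega, hi⟩, ih]
    rw [PySem.Int.mod_eq_emod_of_pos (by norm_num [pyMOD])]
    rw [Int.add_emod, Int.emod_emod_of_dvd _ dvd_rfl, ← Int.add_emod]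
    congr 1
    push_cast
    ring

lemma mulmod (x y : Int) : (x * (y % pyMOD)) % pyMOD = (x * y) % pyMOD := by
  conv_lhs => rw [Int.mul_emod]
  rw [Int.emod_emod_of_dvd _ dvd_rfl, ← Int.mul_emod]

lemma zipmap_length (dp : List Int) :
    ((dp.zip (0 :: dp)).map (fun p => PySem.Int.mod (p.1 + p.2) pyMOD)).length = dp.length := by
  simp

lemma zipmap_getD (dp : List Int) (i : Nat) (hi : i < dp.length) :
    ((dp.zip (0 :: dp)).map (fun p => PySem.Int.mod (p.1 + p.2) pyMOD)).getD i 0 =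
      PySem.Int.mod (dp.getD i 0 + (0 :: dp).getD i 0) pyMOD := by
  have hz : i < ((dp.zip (0 :: dp)).map (fun p => PySem.Int.mod (p.1 + p.2) pyMOD)).length := by
    rw [zipmap_length]; exact hi
  rw [List.getD_eq_getElem _ 0 hz, List.getElem_map, List.getElem_zip]
  rw [List.getD_eq_getElem dp 0 hi, List.getD_eq_getElem (0 :: dp) 0 (by simp; omega)]

lemma map_getD (dp : List Int) (f : Int → Int) (i : Nat) (hi : i < dp.length) :
    (dp.map f).getD i 0 = f (dp.getD i 0) := by
  rw [List.getD_eq_getElem _ 0 (by simpa using hi), List.getElem_map,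
    List.getD_eq_getElem dp 0 hi]

lemma mod_bounds (x : Int) : 0 ≤ PySem.Int.mod x pyMOD ∧ PySem.Int.mod x pyMOD < pyMOD :=
  ⟨PySem.Int.mod_nonneg x (by norm_num [pyMOD]), PySem.Int.mod_lt x (by norm_num [pyMOD])⟩

-- the per-bit steps of the two ports agree on any state of the right length whose entries lie in [0, pyMOD)
lemma step_eq (c : Nat) (k : Int) (hk : 0 ≤ k) (bit : Int) (dp : List Int)
    (hlen : dp.length = c + 1) (hinv : pvInv dp) :
    (if bit == 1 then pascalLoop dp (c : Int) else repLoop dp k (c : Int))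
      = (if bit == 1 then
          (dp.zip (0 :: dp)).map (fun p => PySem.Int.mod (p.1 + p.2) pyMOD)
        else
          dp.map (fun x => PySem.Int.mod (x * (PySem.Int.mod (k + 1) pyMOD)) pyMOD)) ∧
    ((if bit == 1 then
          (dp.zip (0 :: dp)).map (fun p => PySem.Int.mod (p.1 + p.2) pyMOD)
        else
          dp.map (fun x => PySem.Int.mod (x * (PySem.Int.mod (k + 1) pyMOD)) pyMOD)).length = c + 1) ∧
    pvInv (if bit == 1 then
          (dp.zip (0 :: dp)).map (fun p => PySem.Int.mod (p.1 + p.2) pyMOD)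
        else
          dp.map (fun x => PySem.Int.mod (x * (PySem.Int.mod (k + 1) pyMOD)) pyMOD)) := by
  by_cases hb : bit == 1
  · simp only [hb, if_true]
    refine ⟨?_, by rw [zipmap_length, hlen], ?_⟩
    · apply ext_getD _ _ (by rw [pascalLoop_length, zipmap_length])
      intro i hi
      rw [pascalLoop_length] at hi
      rw [pascalLoop_getD, zipmap_getD dp i hi]
      cases i with
      | zero =>
        rw [if_neg (by omega)]
        simp only [List.getD_cons_zero, add_zero]
        rw [PySem.Int.mod_eq_emod_of_pos (by norm_num [pyMOD])]
        have hmem : dp.getD 0 0 ∈ dp := by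
          rw [List.getD_eq_getElem dp 0 hi]
          exact List.getElem_mem hi
        obtain ⟨h0, h1⟩ := hinv _ hmem
        exact (Int.emod_eq_of_lt h0 h1).symm
      | succ j =>
        rw [if_pos ⟨by omega, by omega, hi⟩, List.getD_cons_succ]
        simp
    · intro x hx
      obtain ⟨p, _, rfl⟩ := List.mem_map.mp hx
      exact mod_bounds _
  · rw [Bool.not_eq_true] at hb
    simp only [hb, Bool.false_eq_true, if_false]
    have hk' : ((k.toNat : Nat) : Int) = k := Int.toNat_of_nonneg hk
    refine ⟨?_, by rw [List.length_map, hlen], ?_⟩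
    · apply ext_getD _ _ (by rw [← hk', repLoop_length, List.length_map])
      intro i hi
      rw [← hk', repLoop_length] at hi
      rw [← hk', repLoop_getD dp c hlen hinv k.toNat i hi, map_getD dp _ i hi]
      rw [PySem.Int.mod_eq_emod_of_pos (by norm_num [pyMOD]),
        PySem.Int.mod_eq_emod_of_pos (by norm_num [pyMOD]), mulmod, hk']
    · intro x hx
      obtain ⟨y, _, rfl⟩ := List.mem_map.mp hx
      exact mod_bounds _

lemma fold_eq (c : Nat) (k : Int) (hk : 0 ≤ k) (bs : List Int) :
    ∀ dp : List Int, dp.length = c + 1 → pvInv dp →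
      bs.foldl (fun dp bit => if bit == 1 then pascalLoop dp (c : Int) else repLoop dp k (c : Int)) dp
        = bs.foldl (fun dp bit =>
            if bit == 1 then (dp.zip (0 :: dp)).map (fun p => PySem.Int.mod (p.1 + p.2) pyMOD)
            else dp.map (fun x => PySem.Int.mod (x * (PySem.Int.mod (k + 1) pyMOD)) pyMOD)) dp ∧
      (bs.foldl (fun dp bit =>
            if bit == 1 then (dp.zip (0 :: dp)).map (fun p => PySem.Int.mod (p.1 + p.2) pyMOD)
            else dp.map (fun x => PySem.Int.mod (x * (PySem.Int.mod (k + 1) pyMOD)) pyMOD)) dp).length = c + 1 := by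
  induction bs with
  | nil => intro dp h1 _; exact ⟨rfl, h1⟩
  | cons b bs ih =>
    intro dp h1 h2
    obtain ⟨he, hl, hv⟩ := step_eq c k hk b dp h1 h2
    rw [List.foldl_cons, List.foldl_cons, he]
    exact ih _ hl hv

-- ===== VERDICT (by name: the statement is the Claim_ definition above) =====
theorem count_valid_subsequences_spec : Claim_equal_count_valid_subsequences := by
  intro bs k _ hp
  unfold Pre_count_valid_subsequences at hp
  unfold Spec_count_valid_subsequences count_valid_subsequences count_valid_subsequences_alt
  simp only [PySem.List.pyRepeat_singleton]
  set c : Nat := PySem.List.count bs 1 with hc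
  have hdp0A : PySem.List.pySetD (List.replicate ((c : Int) + 1).toNat (0 : Int)) 0 1
      = (1 : Int) :: List.replicate c 0 := by
    rw [show ((c : Int) + 1).toNat = c + 1 by omega,
      show (0 : Int) = ((0 : Nat) : Int) by norm_num, PySem.List.pySetD_natCast,
      List.replicate_succ, List.set_cons_zero]
  have hdp0B : (1 : Int) :: List.replicate ((c : Int)).toNat (0 : Int)
      = (1 : Int) :: List.replicate c 0 := by
    rw [Int.toNat_natCast]
  rw [hdp0A, hdp0B]
  have hlen0 : ((1 : Int) :: List.replicate c (0 : Int)).length = c + 1 := by simp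
  have hinv0 : pvInv ((1 : Int) :: List.replicate c (0 : Int)) := by
    intro x hx
    rcases List.mem_cons.mp hx with h | h
    · subst h; norm_num [pyMOD]
    · rw [List.eq_of_mem_replicate h]; norm_num [pyMOD]
  obtain ⟨he, hl⟩ := fold_eq c k hp bs _ hlen0 hinv0
  rw [he]
  set dpf := bs.foldl (fun dp bit =>
      if bit == 1 then (dp.zip (0 :: dp)).map (fun p => PySem.Int.mod (p.1 + p.2) pyMOD)
      else dp.map (fun x => PySem.Int.mod (x * (PySem.Int.mod (k + 1) pyMOD)) pyMOD))
    ((1 : Int) :: List.replicate c 0) with hdpf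
  have hmin : 0 ≤ PySem.Int.floordiv (k + 1) 2 := by
    rw [PySem.Int.floordiv_eq_ediv_of_pos (by norm_num)]
    exact Int.ediv_nonneg (by omega) (by omega)
  rw [show ((c : Int) + 1) = ((dpf.length : Nat) : Int) by rw [hl]; push_cast; ring]
  rw [PySem.List.map_pyGetD_pyRange' dpf 0 hmin]
  rw [PySem.List.slice_from dpf hmin]
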